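-- pv_equiv track=rewrite | github.com/kemtol/biasfx | service/idx-fetch-news.py | expand_templates
-- ===== SOURCE A (Python) =====
-- def expand_templates(q:str, tickers, companies, invmgrs, tokohs, years) -> list[str]:
--     out=[q]
--     def rep_multi(items, token):
--         new=[]
--         for s in out:
--             if f"[{token}]" in s:
--                 lst = items[:20] if items else []   # batasi spy ringan
--                 new.extend([s.replace(f"[{token}]", itm) for itm in (lst or [""])])
--             else:
--                 new.append(s)
--         return new
--     out = rep_multi(tickers,   "kode emiten")
--     out = rep_multi(companies, "nama perusahaan")
--     out = rep_multi(invmgrs,   "nama manajer investasi")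
--     out = rep_multi(tokohs,    "nama tokoh investor")
--     out = rep_multi(years,     "tahun")
--     return [" ".join(s.split()) for s in out]
-- ===== SOURCE B (Python) =====
-- def expand_templates(q: str, tickers, companies, invmgrs, tokohs, years) -> list[str]:
--     specs = [(tickers, "[kode emiten]"),
--              (companies, "[nama perusahaan]"),
--              (invmgrs, "[nama manajer investasi]"),
--              (tokohs, "[nama tokoh investor]"),
--              (years, "[tahun]")]
--     def go(s, i):
--         if i == len(specs):
--             return [" ".join(s.split())]
--         items, tok = specs[i]
--         if tok not in s:
--             return go(s, i + 1)
--         repl = items[:20] if items else [""]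
--         return [r for itm in repl for r in go(s.replace(tok, itm), i + 1)]
--     return go(q, 0)
-- ===== Notes on version B (the rewrite author's own statement) =====
-- stated objective: simpler
-- what changed: Replaces the five sequential whole-list rebuilding passes (rep_multi repeatedly reconstructing the growing output list) by a single depth-first recursion over the (items, token) spec list that expands each string to its final forms directly, normalizing whitespace at the leaves.
import Mathlib
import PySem

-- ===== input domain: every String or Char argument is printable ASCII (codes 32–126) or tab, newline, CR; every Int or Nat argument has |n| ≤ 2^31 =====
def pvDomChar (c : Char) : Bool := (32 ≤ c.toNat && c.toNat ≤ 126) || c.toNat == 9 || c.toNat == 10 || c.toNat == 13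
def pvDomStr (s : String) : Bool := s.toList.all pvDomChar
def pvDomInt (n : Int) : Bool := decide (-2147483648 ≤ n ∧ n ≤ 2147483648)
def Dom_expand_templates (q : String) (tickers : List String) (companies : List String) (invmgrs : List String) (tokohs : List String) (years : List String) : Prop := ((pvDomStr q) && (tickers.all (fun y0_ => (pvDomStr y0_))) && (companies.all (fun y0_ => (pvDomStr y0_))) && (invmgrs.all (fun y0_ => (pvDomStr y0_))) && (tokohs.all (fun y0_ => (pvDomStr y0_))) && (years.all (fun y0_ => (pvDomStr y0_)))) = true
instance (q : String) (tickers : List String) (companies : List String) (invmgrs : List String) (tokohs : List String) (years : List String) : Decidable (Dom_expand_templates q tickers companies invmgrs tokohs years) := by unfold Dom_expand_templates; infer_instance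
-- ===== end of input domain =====

-- B replaces A's five sequential whole-list rebuilding passes by one depth-first recursion
-- over the (items, token) spec list; objective: simpler.

-- ===== PORT A =====
-- rep_multi: rebuilds `out` once per token, expanding strings containing "[token]"
def repMulti (out : List String) (items : List String) (tok : String) : List String :=
  out.foldl (fun new s =>
    if PySem.Str.isIn tok s then
      let lst := if items.isEmpty then [] else PySem.List.slice items none (some 20)
      new ++ ((if lst.isEmpty then [""] else lst).map (fun itm => PySem.Str.replace s tok itm))
    else new ++ [s]) []

def expand_templates (q : String) (tickers : List String) (companies : List String) (invmgrs : List String) (tokohs : List String) (years : List String) : List String :=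
  let out := [q]
  let out := repMulti out tickers "[kode emiten]"
  let out := repMulti out companies "[nama perusahaan]"
  let out := repMulti out invmgrs "[nama manajer investasi]"
  let out := repMulti out tokohs "[nama tokoh investor]"
  let out := repMulti out years "[tahun]"
  out.map (fun s => PySem.Str.join " " (PySem.Str.split₀ s))

-- ===== PORT B =====
-- go: depth-first expansion of one string over the remaining specs; whitespace normalized at the leaf
def goAlt : String → List (List String × String) → List String
  | s, [] => [PySem.Str.join " " (PySem.Str.split₀ s)]
  | s, (items, tok) :: rest =>
    if PySem.Str.isIn tok s then
      (if items.isEmpty then [""] else PySem.List.slice items none (some 20)).flatMap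
        (fun itm => goAlt (PySem.Str.replace s tok itm) rest)
    else goAlt s rest

def expand_templates_alt (q : String) (tickers : List String) (companies : List String) (invmgrs : List String) (tokohs : List String) (years : List String) : List String :=
  goAlt q [(tickers, "[kode emiten]"), (companies, "[nama perusahaan]"),
           (invmgrs, "[nama manajer investasi]"), (tokohs, "[nama tokoh investor]"),
           (years, "[tahun]")]

-- ===== PRECONDITION & SPEC =====
def Spec_expand_templates (q : String) (tickers : List String) (companies : List String) (invmgrs : List String) (tokohs : List String) (years : List String) (out : List String) : Prop := out = expand_templates_alt q tickers companies invmgrs tokohs years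
instance (q : String) (tickers : List String) (companies : List String) (invmgrs : List String) (tokohs : List String) (years : List String) (out : List String) : Decidable (Spec_expand_templates q tickers companies invmgrs tokohs years out) := by unfold Spec_expand_templates; infer_instance

-- ===== CLAIM (what is proved, stated in full; the proofs are below) =====
def Claim_equal_expand_templates : Prop := ∀ (q : String) (tickers : List String) (companies : List String) (invmgrs : List String) (tokohs : List String) (years : List String), Dom_expand_templates q tickers companies invmgrs tokohs years → Spec_expand_templates q tickers companies invmgrs tokohs years (expand_templates q tickers companies invmgrs tokohs years)

-- ===== LEMMAS AND PROOFS =====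

-- what one rep_multi pass does to a single string
def stepA (items : List String) (tok : String) (s : String) : List String :=
  if PySem.Str.isIn tok s then
    (if items.isEmpty then [""] else PySem.List.slice items none (some 20)).map
      (fun itm => PySem.Str.replace s tok itm)
  else [s]

lemma repMulti_eq_flatMap (out items : List String) (tok : String) :
    repMulti out items tok = out.flatMap (stepA items tok) := by
  suffices h : ∀ acc, out.foldl (fun new s =>
      if PySem.Str.isIn tok s then
        let lst := if items.isEmpty then [] else PySem.List.slice items none (some 20)
        new ++ ((if lst.isEmpty then [""] else lst).map (fun itm => PySem.Str.replace s tok itm))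
      else new ++ [s]) acc = acc ++ out.flatMap (stepA items tok) by
    simpa [repMulti] using h []
  induction out with
  | nil => intro acc; simp
  | cons s rest ih =>
    intro acc
    simp only [List.foldl_cons, List.flatMap_cons, ih]
    by_cases hc : PySem.Chars.isIn tok.toList s.toList = true
    · by_cases hi : items = []
      · simp [stepA, hc, hi, List.append_assoc]
      · have hs : PySem.List.slice items none (some 20) = items.take 20 := by
          simp [pysem]
        have hne : items.take 20 ≠ [] := by
          cases items with
          | nil => exact absurd rfl hi
          | cons a t => simp
        simp [stepA, hc, hi, hs, hne, List.append_assoc]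
    · simp [stepA, hc, List.append_assoc]

-- sequential passes over a spec list, followed by whitespace normalization
def applyAll (specs : List (List String × String)) (out : List String) : List String :=
  specs.foldl (fun o p => repMulti o p.1 p.2) out

lemma applyAll_map_eq_goAlt (specs : List (List String × String)) (out : List String) :
    (applyAll specs out).map (fun s => PySem.Str.join " " (PySem.Str.split₀ s)) =
      out.flatMap (fun s => goAlt s specs) := by
  induction specs generalizing out with
  | nil =>
    simp [applyAll, goAlt]
    induction out with
    | nil => simp
    | cons s rest ih => simp [ih]
  | cons p rest ih =>
    obtain ⟨items, tok⟩ := p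
    have : applyAll ((items, tok) :: rest) out = applyAll rest (repMulti out items tok) := rfl
    rw [this, ih, repMulti_eq_flatMap, List.flatMap_assoc]
    apply List.flatMap_congr
    intro s _
    by_cases hc : PySem.Chars.isIn tok.toList s.toList = true
    · simp [stepA, hc, goAlt, List.flatMap_map]
    · simp [stepA, hc, goAlt]

-- ===== VERDICT (by name: the statement is the Claim_ definition above) =====
theorem expand_templates_spec : Claim_equal_expand_templates := by
  intro q tickers companies invmgrs tokohs years _
  show expand_templates q tickers companies invmgrs tokohs years
      = expand_templates_alt q tickers companies invmgrs tokohs years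
  have h := applyAll_map_eq_goAlt
    [(tickers, "[kode emiten]"), (companies, "[nama perusahaan]"),
     (invmgrs, "[nama manajer investasi]"), (tokohs, "[nama tokoh investor]"),
     (years, "[tahun]")] [q]
  simpa [expand_templates, expand_templates_alt, applyAll] using h
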